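-- pv_equiv track=rewrite | github.com/Bjorn-Eu/AoC2024 | day9.py | create_pointers
-- ===== SOURCE A (Python) =====
-- def create_pointers(disk):
--     occupied_memory = []
--     free_memory = []
--     length = len(disk)
--     index = 0
--     for i in range(length//2):
--         occupied_memory.append([index,disk[2*i]]) #pointer and size
--         index += disk[2*i]
--         free_memory.append([index,disk[2*i+1]])
--         index += disk[2*i+1]
--
--     occupied_memory.append([index,disk[length-1]])
--     return occupied_memory,free_memory
-- ===== SOURCE B (Python) =====
-- def create_pointers(disk):
--     # prefix-sum table: P[k] = sum(disk[:k])
--     P = [0]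
--     for d in disk:
--         P.append(P[-1] + d)
--     half = len(disk) // 2
--     occupied_memory = [[P[2 * i], disk[2 * i]] for i in range(half)]
--     occupied_memory.append([P[2 * half], disk[len(disk) - 1]])
--     free_memory = [[P[2 * i + 1], disk[2 * i + 1]] for i in range(half)]
--     return occupied_memory, free_memory
-- ===== Notes on version B (the rewrite author's own statement) =====
-- stated objective: alternative
-- what changed: Replaces the single stateful loop carrying a running index with a separate prefix-sum table pass followed by two independent comprehensions that index into the table.
import Mathlib
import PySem

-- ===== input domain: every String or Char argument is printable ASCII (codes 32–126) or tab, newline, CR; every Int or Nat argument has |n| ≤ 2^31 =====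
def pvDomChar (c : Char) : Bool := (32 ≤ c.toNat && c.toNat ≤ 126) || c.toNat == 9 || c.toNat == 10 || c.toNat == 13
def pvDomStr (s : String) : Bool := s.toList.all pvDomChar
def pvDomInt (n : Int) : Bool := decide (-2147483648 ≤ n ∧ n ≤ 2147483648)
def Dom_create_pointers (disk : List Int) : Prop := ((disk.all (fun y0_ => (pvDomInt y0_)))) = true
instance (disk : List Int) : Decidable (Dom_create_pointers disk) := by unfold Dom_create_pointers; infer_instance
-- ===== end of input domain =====

-- B replaces A's single stateful loop (running index) by a prefix-sum table pass plus two
-- independent comprehensions; equivalence of the two decompositions is proved on nonempty disks.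

-- ===== PORT A =====
-- literal port of A: one loop over range(len//2) carrying (occupied, free, index)
def create_pointers (disk : List Int) : List (List Int) × List (List Int) :=
  let length : Int := disk.length
  let st :=
    (PySem.List.pyRange 0 (PySem.Int.floordiv length 2) 1).foldl
      (fun (st : List (List Int) × List (List Int) × Int) i =>
        let d1 := (PySem.List.pyGet? disk (2 * i)).getD 0
        let occ := st.1 ++ [[st.2.2, d1]]
        let index := st.2.2 + d1
        let d2 := (PySem.List.pyGet? disk (2 * i + 1)).getD 0
        let free := st.2.1 ++ [[index, d2]]
        (occ, free, index + d2)) ([], [], 0)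
  (st.1 ++ [[st.2.2, (PySem.List.pyGet? disk (length - 1)).getD 0]], st.2.1)

-- ===== PORT B =====
-- literal port of Source B: prefix-sum table P (built by a loop appending P[-1]+d), then
-- two comprehensions over range(len//2) indexing into P and disk
def create_pointers_alt (disk : List Int) : List (List Int) × List (List Int) :=
  let P := disk.foldl (fun P d => P ++ [(PySem.List.pyGet? P (-1)).getD 0 + d]) [0]
  let half : Nat := disk.length / 2
  let occupied :=
    (List.range half).map (fun i =>
      [(PySem.List.pyGet? P ((2 * i : Nat) : Int)).getD 0,
       (PySem.List.pyGet? disk ((2 * i : Nat) : Int)).getD 0])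
    ++ [[(PySem.List.pyGet? P ((2 * half : Nat) : Int)).getD 0,
         (PySem.List.pyGet? disk ((disk.length : Int) - 1)).getD 0]]
  let free :=
    (List.range half).map (fun i =>
      [(PySem.List.pyGet? P ((2 * i + 1 : Nat) : Int)).getD 0,
       (PySem.List.pyGet? disk ((2 * i + 1 : Nat) : Int)).getD 0])
  (occupied, free)

-- ===== PRECONDITION & SPEC =====
-- A raises IndexError (disk[length-1]) on the empty list; both programs raise there.
def Pre_create_pointers (disk : List Int) : Prop := disk ≠ []
instance (disk : List Int) : Decidable (Pre_create_pointers disk) := by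
  unfold Pre_create_pointers; infer_instance
def pvWitness_create_pointers : List Int := [1, 2, 3, 4, 5]

def Spec_create_pointers (disk : List Int) (out : List (List Int) × List (List Int)) : Prop := out = create_pointers_alt disk
instance (disk : List Int) (out : List (List Int) × List (List Int)) : Decidable (Spec_create_pointers disk out) := by unfold Spec_create_pointers; infer_instance

-- ===== CLAIM (what is proved, stated in full; the proofs are below) =====
def Claim_equal_create_pointers : Prop := ∀ (disk : List Int), Dom_create_pointers disk → Pre_create_pointers disk → Spec_create_pointers disk (create_pointers disk)

-- ===== LEMMAS AND PROOFS =====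

-- running prefix sums starting from s
def psums (s : Int) : List Int → List Int
  | [] => []
  | d :: ds => (s + d) :: psums (s + d) ds

theorem psums_length (s : Int) (ds : List Int) : (psums s ds).length = ds.length := by
  induction ds generalizing s with
  | nil => rfl
  | cons d ds ih => simp [psums, ih]

theorem psums_getElem (s : Int) (ds : List Int) (k : Nat) (hk : k < ds.length) :
    (psums s ds)[k]'(by rw [psums_length]; exact hk) = s + (ds.take (k + 1)).sum := by
  induction ds generalizing s k with
  | nil => simp at hk
  | cons d ds ih =>
    cases k with
    | zero => simp [psums]
    | succ k =>
      simp only [psums, List.getElem_cons_succ, List.take_succ_cons, List.sum_cons]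
      rw [ih (s + d) k (by simpa using hk)]
      ring

-- the P-building fold produces the prefix-sum list
theorem fold_psums (ds : List Int) (P0 : List Int) (x : Int) :
    ds.foldl (fun P d => P ++ [(PySem.List.pyGet? P (-1)).getD 0 + d]) (P0 ++ [x]) =
      (P0 ++ [x]) ++ psums x ds := by
  induction ds generalizing P0 x with
  | nil => simp [psums]
  | cons d ds ih =>
    simp only [List.foldl_cons, PySem.List.pyGet?_neg_one_append_singleton, Option.getD_some]
    rw [List.append_assoc P0 [x] [x + d]]
    have := ih (P0 ++ [x]) (x + d)
    simp only [List.append_assoc] at this ⊢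
    rw [this]
    simp [psums]

theorem P_eq (disk : List Int) :
    disk.foldl (fun P d => P ++ [(PySem.List.pyGet? P (-1)).getD 0 + d]) [0] =
      0 :: psums 0 disk := by
  have := fold_psums disk [] 0
  simpa using this

-- value of the table at index j ≤ len: the sum of the first j elements
theorem P_get (disk : List Int) (j : Nat) (hj : j ≤ disk.length) :
    (PySem.List.pyGet? (0 :: psums 0 disk) ((j : Nat) : Int)).getD 0 =
      (disk.take j).sum := by
  rw [PySem.List.pyGet?_natCast]
  cases j with
  | zero => simp
  | succ k =>
    have hk : k < disk.length := by omega
    have hlen : k + 1 < (0 :: psums 0 disk).length := by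
      simp [psums_length]; omega
    rw [List.getElem?_eq_getElem hlen]
    simp only [List.getElem_cons_succ, Option.getD_some]
    rw [psums_getElem 0 disk k hk]
    ring

-- convenient notations for the proof
def gd (disk : List Int) (j : Nat) : Int := (disk[j]?).getD 0
def S (disk : List Int) (j : Nat) : Int := (disk.take j).sum

theorem S_succ (disk : List Int) (k : Nat) (hk : k < disk.length) :
    S disk (k + 1) = S disk k + gd disk k := by
  unfold S gd
  rw [List.take_add_one, List.sum_append, List.getElem?_eq_getElem hk]
  simp

-- A's loop invariant, by induction on the number of completed iterations
theorem A_fold (disk : List Int) (m : Nat) (hm : m ≤ disk.length / 2) :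
    (List.range m).foldl
      (fun (st : List (List Int) × List (List Int) × Int) (k : Nat) =>
        let d1 := (PySem.List.pyGet? disk (2 * ((0 : Int) + (k : Nat)))).getD 0
        let occ := st.1 ++ [[st.2.2, d1]]
        let index := st.2.2 + d1
        let d2 := (PySem.List.pyGet? disk (2 * ((0 : Int) + (k : Nat)) + 1)).getD 0
        let free := st.2.1 ++ [[index, d2]]
        (occ, free, index + d2)) ([], [], 0) =
      ((List.range m).map (fun i => [S disk (2 * i), gd disk (2 * i)]),
       (List.range m).map (fun i => [S disk (2 * i + 1), gd disk (2 * i + 1)]),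
       S disk (2 * m)) := by
  induction m with
  | zero => simp [S]
  | succ m ih =>
    have h1 : 2 * m < disk.length := by omega
    have h2 : 2 * m + 1 < disk.length := by omega
    rw [List.range_succ, List.foldl_append, ih (by omega), List.foldl_cons, List.foldl_nil]
    have e1 : (2 : Int) * ((0 : Int) + (m : Nat)) = ((2 * m : Nat) : Int) := by push_cast; ring
    have e2 : (2 : Int) * ((0 : Int) + (m : Nat)) + 1 = ((2 * m + 1 : Nat) : Int) := by
      push_cast; ring
    rw [e2, e1]
    simp only [PySem.List.pyGet?_natCast]
    have g1 : (disk[2 * m]?).getD 0 = gd disk (2 * m) := rfl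
    have g2 : (disk[2 * m + 1]?).getD 0 = gd disk (2 * m + 1) := rfl
    have hs1 : S disk (2 * m + 1) = S disk (2 * m) + gd disk (2 * m) := S_succ disk (2 * m) h1
    have hs2 : S disk (2 * (m + 1)) = S disk (2 * m + 1) + gd disk (2 * m + 1) := by
      rw [show 2 * (m + 1) = (2 * m + 1) + 1 by ring]
      exact S_succ disk (2 * m + 1) h2
    simp only [g1, g2, List.map_append, List.map_cons, List.map_nil, hs2, hs1]

-- ===== VERDICT (by name: the statement is the Claim_ definition above) =====
theorem create_pointers_spec : Claim_equal_create_pointers := by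
  intro disk _ hpre
  unfold Spec_create_pointers create_pointers create_pointers_alt
  dsimp only
  rw [P_eq]
  have hfd : PySem.Int.floordiv ((disk.length : Nat) : Int) 2 = ((disk.length / 2 : Nat) : Int) :=
    PySem.Int.floordiv_natCast disk.length 2
  rw [hfd, PySem.List.pyRange_one]
  simp only [Int.sub_zero, Int.toNat_natCast, List.foldl_map]
  rw [A_fold disk (disk.length / 2) (le_refl _)]
  have hP : ∀ j : Nat, j ≤ disk.length →
      (PySem.List.pyGet? (0 :: psums 0 disk) ((j : Nat) : Int)).getD 0 = S disk j :=
    fun j hj => P_get disk j hj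
  dsimp only
  simp only [Prod.mk.injEq]
  refine ⟨?_, ?_⟩
  · congr 1
    · apply List.map_congr_left
      intro i hi
      have hilt : i < disk.length / 2 := List.mem_range.mp hi
      rw [hP (2 * i) (by omega)]
      simp only [PySem.List.pyGet?_natCast, gd]
    · rw [hP (2 * (disk.length / 2)) (by omega)]
  · apply List.map_congr_left
    intro i hi
    have hilt : i < disk.length / 2 := List.mem_range.mp hi
    rw [hP (2 * i + 1) (by omega)]
    simp only [PySem.List.pyGet?_natCast, gd]
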